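-- pv_equiv track=rewrite | github.com/TropicalBreeding/coffee-pathogen-kmer-ml | 3_build_kmer_matrix.py | kmer_to_index
-- ===== SOURCE A (Python) =====
-- DNA_MAP = {'A':0,'C':1,'G':2,'T':3,'a':0,'c':1,'g':2,'t':3}
--
-- def kmer_to_index(seq: str) -> int:
--     """Convert A/C/G/T k-mer to base-4 integer index. Return -1 if non-ACGT."""
--     idx = 0
--     for ch in seq:
--         v = DNA_MAP.get(ch)
--         if v is None:
--             return -1
--         idx = (idx * 4) + v
--     return idx
-- ===== SOURCE B (Python) =====
-- DNA_MAP = {'A':0,'C':1,'G':2,'T':3,'a':0,'c':1,'g':2,'t':3}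
--
-- def kmer_to_index(seq: str) -> int:
--     """Convert A/C/G/T k-mer to base-4 integer index. Return -1 if non-ACGT."""
--     if not set(seq) <= DNA_MAP.keys():
--         return -1
--     n = len(seq)
--     return sum(DNA_MAP[ch] * 4 ** (n - 1 - i) for i, ch in enumerate(seq))
-- ===== Notes on version B (the rewrite author's own statement) =====
-- stated objective: alternative
-- what changed: A's single short-circuiting Horner loop is replaced by a validate-first subset check on the character set followed by a separate positional sum of DNA_MAP[ch]*4**(n-1-i) over enumerate(seq).
import Mathlib
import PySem

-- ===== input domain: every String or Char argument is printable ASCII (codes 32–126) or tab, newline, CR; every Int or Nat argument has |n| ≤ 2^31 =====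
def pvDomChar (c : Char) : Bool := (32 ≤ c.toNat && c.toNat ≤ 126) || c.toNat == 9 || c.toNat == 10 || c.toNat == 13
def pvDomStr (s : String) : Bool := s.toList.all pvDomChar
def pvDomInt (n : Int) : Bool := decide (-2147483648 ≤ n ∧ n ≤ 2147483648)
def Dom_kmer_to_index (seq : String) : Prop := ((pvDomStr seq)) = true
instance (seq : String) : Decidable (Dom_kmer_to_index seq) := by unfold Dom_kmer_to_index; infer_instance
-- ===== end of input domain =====

-- B replaces A's short-circuiting Horner loop by a validate-then-positional-sum decomposition (objective: alternative).

-- DNA_MAP = {'A':0,'C':1,'G':2,'T':3,'a':0,'c':1,'g':2,'t':3}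
def dnaMap : PySem.Dict Char Int :=
  PySem.Dict.ofList [('A',0),('C',1),('G',2),('T',3),('a',0),('c',1),('g',2),('t',3)]

-- ===== PORT A =====
-- the for-loop with early return: structural recursion over the characters carrying idx
def kmerLoopA : List Char → Int → Int
  | [], idx => idx
  | ch :: rest, idx =>
    match dnaMap.get? ch with
    | none => -1
    | some v => kmerLoopA rest (idx * 4 + v)

def kmer_to_index (seq : String) : Int := kmerLoopA seq.toList 0

-- ===== PORT B =====
-- set(seq) <= DNA_MAP.keys()  ⇔  every character of seq is a key of DNA_MAP
-- sum over enumerate(seq); the exponent n-1-i is ≥ 0 for every index i, toNat is exact here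
def kmer_to_index_alt (seq : String) : Int :=
  if seq.toList.all (fun c => (dnaMap.get? c).isSome) then
    ((PySem.List.enumerate seq.toList 0).map
      (fun p => dnaMap.getD p.2 0 * 4 ^ ((Int.ofNat seq.toList.length) - 1 - p.1).toNat)).sum
  else -1

-- ===== PRECONDITION & SPEC =====
def Spec_kmer_to_index (seq : String) (out : Int) : Prop := out = kmer_to_index_alt seq
instance (seq : String) (out : Int) : Decidable (Spec_kmer_to_index seq out) := by unfold Spec_kmer_to_index; infer_instance

-- ===== CLAIM (what is proved, stated in full; the proofs are below) =====
def Claim_equal_kmer_to_index : Prop := ∀ (seq : String), Dom_kmer_to_index seq → Spec_kmer_to_index seq (kmer_to_index seq)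

-- ===== LEMMAS AND PROOFS =====

-- positional value of a fully valid k-mer: v(head) * 4^(len tail) + value(tail)
def posVal : List Char → Int
  | [] => 0
  | c :: cs => dnaMap.getD c 0 * 4 ^ cs.length + posVal cs

theorem kmerLoopA_eq (l : List Char) : ∀ idx : Int,
    kmerLoopA l idx =
      if l.all (fun c => (dnaMap.get? c).isSome) then idx * 4 ^ l.length + posVal l else -1 := by
  induction l with
  | nil => intro idx; simp [kmerLoopA, posVal]
  | cons c cs ih =>
    intro idx
    cases h : dnaMap.get? c with
    | none => simp [kmerLoopA, h]
    | some v =>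
      have hv : dnaMap.getD c 0 = v := by simp [PySem.Dict.getD, h]
      simp only [kmerLoopA, h, ih, List.all_cons, Option.isSome_some, Bool.true_and,
        List.length_cons, posVal, hv]
      split_ifs with hall
      · ring
      · rfl

theorem sum_enumerate_eq (l : List Char) : ∀ (s n : Int), n = s + l.length →
    ((PySem.List.enumerate l s).map
      (fun p => dnaMap.getD p.2 0 * 4 ^ (n - 1 - p.1).toNat)).sum = posVal l := by
  induction l with
  | nil => intro s n _; simp [PySem.List.enumerate_nil, posVal]
  | cons c cs ih =>
    intro s n hn
    have hexp : (n - 1 - s).toNat = cs.length := by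
      simp only [List.length_cons] at hn; omega
    simp only [PySem.List.enumerate_cons, List.map_cons, List.sum_cons, posVal, hexp]
    congr 1
    exact ih (s + 1) n (by simp only [List.length_cons] at hn ⊢; omega)

-- ===== VERDICT (by name: the statement is the Claim_ definition above) =====
theorem kmer_to_index_spec : Claim_equal_kmer_to_index := by
  intro seq _
  unfold Spec_kmer_to_index kmer_to_index kmer_to_index_alt
  rw [kmerLoopA_eq]
  split_ifs with h
  · rw [sum_enumerate_eq seq.toList 0 (Int.ofNat seq.toList.length) (by simp)]
    ring
  · rfl
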